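-- pv_equiv track=rewrite | github.com/chlgudrbdn/EPSpredict_with_footnotes | run_analysis_per_q_ind.py | pick_per_n
-- ===== SOURCE A (Python) =====
-- def pick_per_n(result_list, n):
--     result = []
--     for i in range(n):  # 1분기, 2분기 또는 산업
--         tmp = []
--         for j in range(i, len(result_list), n):
--             tmp.append(result_list[j])
--         result.append(tmp)
--     return result
-- ===== SOURCE B (Python) =====
-- def pick_per_n(result_list, n):
--     result = [[] for _ in range(n)]
--     if result:
--         for idx, val in enumerate(result_list):
--             result[idx % n].append(val)
--     return result
-- ===== Notes on version B (the rewrite author's own statement) =====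
-- stated objective: alternative
-- what changed: Replaces A's n separate strided scans (one per bucket) by a single enumerate pass that distributes each element into bucket idx % n of a pre-built list of n empty buckets.
import Mathlib
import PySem

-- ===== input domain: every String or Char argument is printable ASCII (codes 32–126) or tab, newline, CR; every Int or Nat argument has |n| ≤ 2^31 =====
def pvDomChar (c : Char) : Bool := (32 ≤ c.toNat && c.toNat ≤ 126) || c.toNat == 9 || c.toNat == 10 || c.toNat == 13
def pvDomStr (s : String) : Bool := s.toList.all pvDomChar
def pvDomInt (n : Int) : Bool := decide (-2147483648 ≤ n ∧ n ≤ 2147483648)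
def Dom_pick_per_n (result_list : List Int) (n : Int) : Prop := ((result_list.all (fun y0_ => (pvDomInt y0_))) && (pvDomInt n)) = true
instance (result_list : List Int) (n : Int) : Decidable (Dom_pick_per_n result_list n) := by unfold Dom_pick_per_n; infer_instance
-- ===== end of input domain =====

-- B replaces A's n strided scans by one enumerate pass that distributes each element into bucket idx % n (alternative decomposition, same cost).


-- ===== PORT A =====
-- result = []; for i in range(n): tmp = []; for j in range(i, len(rl), n): tmp.append(rl[j]); result.append(tmp)
-- (rl[j] is always in range in this loop, so the total pyGetD is exact here)
def pick_per_n (result_list : List Int) (n : Int) : List (List Int) :=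
  (PySem.List.pyRange 0 n 1).foldl
    (fun result i =>
      result ++ [(PySem.List.pyRange i (result_list.length : Int) n).foldl
        (fun tmp j => tmp ++ [PySem.List.pyGetD result_list j 0]) []])
    []

-- ===== PORT B =====
-- result = [[] for _ in range(n)]; if result: for idx, val in enumerate(rl): result[idx % n].append(val); return result
-- (idx % n is always a valid index of result here, so the total pyGetD/pySetD are exact)
def pick_per_n_alt (result_list : List Int) (n : Int) : List (List Int) :=
  let result : List (List Int) := (PySem.List.pyRange 0 n 1).map (fun _ => [])
  if result.isEmpty then result
  else
    (PySem.List.enumerate result_list 0).foldl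
      (fun res p =>
        PySem.List.pySetD res (PySem.Int.mod p.1 n)
          (PySem.List.pyGetD res (PySem.Int.mod p.1 n) [] ++ [p.2]))
      result

-- ===== PRECONDITION & SPEC =====
def Spec_pick_per_n (result_list : List Int) (n : Int) (out : List (List Int)) : Prop := out = pick_per_n_alt result_list n
instance (result_list : List Int) (n : Int) (out : List (List Int)) : Decidable (Spec_pick_per_n result_list n out) := by unfold Spec_pick_per_n; infer_instance

-- ===== CLAIM (what is proved, stated in full; the proofs are below) =====
def Claim_equal_pick_per_n : Prop := ∀ (result_list : List Int) (n : Int), Dom_pick_per_n result_list n → Spec_pick_per_n result_list n (pick_per_n result_list n)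

-- ===== LEMMAS AND PROOFS =====

theorem enumerate_snoc {α : Type} (xs : List α) (x : α) (s : Int) :
    PySem.List.enumerate (xs ++ [x]) s = PySem.List.enumerate xs s ++ [(s + xs.length, x)] := by
  induction xs generalizing s with
  | nil => simp [PySem.List.enumerate_nil, PySem.List.enumerate_cons]
  | cons y ys ih =>
      simp only [List.cons_append, PySem.List.enumerate_cons, ih]
      simp
      omega

theorem pyRange_succ_right_of_pos (a b n : Int) (hn : 0 < n) (hab : a ≤ b) :
    PySem.List.pyRange a (b + 1) n =
      PySem.List.pyRange a b n ++ (if n ∣ b - a then [b] else []) := by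
  have hne : n ≠ 0 := ne_of_gt hn
  have hqr : ((b - a) / n) * n + (b - a) % n = b - a := by
    rw [mul_comm]; exact Int.mul_ediv_add_emod _ _
  have hr0 : 0 ≤ (b - a) % n := Int.emod_nonneg _ hne
  have hrn : (b - a) % n < n := Int.emod_lt_of_pos _ hn
  have hq0 : 0 ≤ (b - a) / n := Int.ediv_nonneg (by omega) (le_of_lt hn)
  have hc2 : (b + 1 - a + n - 1) / n = (b - a) / n + 1 := by
    have h : b + 1 - a + n - 1 = (b - a) + 1 * n := by ring
    rw [h, Int.add_mul_ediv_right _ _ hne]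
  rw [PySem.List.pyRange_of_pos a (b+1) hn, PySem.List.pyRange_of_pos a b hn]
  by_cases hd : n ∣ b - a
  · have hre : (b - a) % n = 0 := Int.emod_eq_zero_of_dvd hd
    rw [if_pos hd]
    by_cases hlt : a < b
    · have hq1 : 1 ≤ (b - a) / n := by nlinarith [hqr]
      have hc1 : (b - a + n - 1) / n = (b - a) / n := by
        have h : b - a + n - 1 = (n - 1) + ((b - a) / n) * n := by omega
        rw [h, Int.add_mul_ediv_right _ _ hne, Int.ediv_eq_zero_of_lt (by omega) (by omega), zero_add]
      rw [if_pos (by omega), if_pos hlt, hc2, hc1]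
      have ht : ((b - a) / n + 1).toNat = ((b - a) / n).toNat + 1 := by omega
      rw [ht, List.range_succ, List.map_append]
      congr 1
      simp only [List.map_cons, List.map_nil]
      have hc : (((b - a) / n).toNat : Int) = (b - a) / n := Int.toNat_of_nonneg hq0
      congr 1
      rw [hc]
      linarith
    · have hab' : a = b := by omega
      have hq' : (b - a) / n = 0 := by subst hab'; simp
      rw [if_pos (by omega), if_neg hlt, hc2, hq']
      simp [hab']
  · have hre : (b - a) % n ≠ 0 := fun h => hd (Int.dvd_of_emod_eq_zero h)
    have hlt : a < b := by
      rcases lt_or_eq_of_le hab with h|h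
      · exact h
      · exact absurd (by rw [← h]; simp) hre
    have hc1 : (b - a + n - 1) / n = (b - a) / n + 1 := by
      have h : b - a + n - 1 = ((b - a) % n - 1) + ((b - a) / n + 1) * n := by
        have e : ((b - a) / n + 1) * n = ((b - a) / n) * n + n := by ring
        omega
      rw [h, Int.add_mul_ediv_right _ _ hne, Int.ediv_eq_zero_of_lt (by omega) (by omega), zero_add]
    rw [if_neg hd, if_pos (by omega), if_pos hlt, hc2, hc1, List.append_nil]

theorem pyRange_pos_eq_nil (a b n : Int) (hn : 0 < n) (h : b ≤ a) :
    PySem.List.pyRange a b n = [] := by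
  rw [PySem.List.pyRange_of_pos a b hn, if_neg (by omega)]
  simp

theorem fold_eq (n : Int) (hn : 0 < n) (rl : List Int) :
    (PySem.List.enumerate rl 0).foldl
      (fun res p => PySem.List.pySetD res (PySem.Int.mod p.1 n)
        (PySem.List.pyGetD res (PySem.Int.mod p.1 n) [] ++ [p.2]))
      ((PySem.List.pyRange 0 n 1).map (fun _ => []))
    = (PySem.List.pyRange 0 n 1).map
        (fun i => (PySem.List.pyRange i (rl.length : Int) n).map
          (fun j => PySem.List.pyGetD rl j 0)) := by
  induction rl using List.reverseRecOn with
  | nil =>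
      simp only [PySem.List.enumerate_nil, List.foldl_nil, List.length_nil, Nat.cast_zero]
      symm
      refine List.map_congr_left (fun i hi => ?_)
      have h0 : 0 ≤ i := (PySem.List.mem_pyRange_one.mp hi).1
      rw [pyRange_pos_eq_nil i 0 n hn h0]
      rfl
  | append_singleton rl x ih =>
      rw [enumerate_snoc, List.foldl_append, ih]
      simp only [List.foldl_cons, List.foldl_nil, zero_add]
      have hN : ((n.toNat : Nat) : Int) = n := Int.toNat_of_nonneg (le_of_lt hn)
      have hNpos : 0 < n.toNat := by omega
      have hmlt : rl.length % n.toNat < n.toNat := Nat.mod_lt _ hNpos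
      have hidx : PySem.Int.mod (rl.length : Int) n = ((rl.length % n.toNat : Nat) : Int) := by
        conv_lhs => rw [← hN]
        rw [PySem.Int.mod_natCast]
      have hlenA : ((PySem.List.pyRange 0 n 1).map
          (fun i => (PySem.List.pyRange i (rl.length : Int) n).map
            (fun j => PySem.List.pyGetD rl j 0))).length = n.toNat := by
        simp [PySem.List.length_pyRange_one]
      rw [hidx, PySem.List.pySetD_natCast, PySem.List.pyGetD_natCast]
      have hget : ((PySem.List.pyRange 0 n 1).map
          (fun i => (PySem.List.pyRange i (rl.length : Int) n).map
            (fun j => PySem.List.pyGetD rl j 0))).getD (rl.length % n.toNat) []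
          = (PySem.List.pyRange ((rl.length % n.toNat : Nat) : Int) (rl.length : Int) n).map
            (fun j => PySem.List.pyGetD rl j 0) := by
        rw [List.getD_eq_getElem _ _ (by rw [hlenA]; exact hmlt), List.getElem_map,
          PySem.List.getElem_pyRange_one _ _ _ (by simpa [PySem.List.length_pyRange_one] using hmlt),
          zero_add]
      rw [hget]
      -- pointwise
      apply List.ext_getElem
      · simp [PySem.List.length_pyRange_one]
      intro k hk1 hk2
      have hkN : k < n.toNat := by
        simpa [PySem.List.length_pyRange_one] using hk1
      rw [List.getElem_set, List.getElem_map, List.getElem_map,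
        PySem.List.getElem_pyRange_one _ _ _ (by simpa [PySem.List.length_pyRange_one] using hkN),
        zero_add]
      have hmapeq : ∀ (a : Int), 0 ≤ a →
          (PySem.List.pyRange a (rl.length : Int) n).map (fun j => PySem.List.pyGetD (rl ++ [x]) j 0)
          = (PySem.List.pyRange a (rl.length : Int) n).map (fun j => PySem.List.pyGetD rl j 0) := by
        intro a ha
        refine List.map_congr_left (fun j hj => ?_)
        obtain ⟨hj1, hj2, -⟩ := (PySem.List.mem_pyRange_iff_of_pos hn j).mp hj
        have h0j : 0 ≤ j := le_trans ha hj1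
        have hjlen : j < ((rl ++ [x]).length : Int) := by simp; omega
        rw [PySem.List.pyGetD_eq_getElem _ _ h0j hjlen,
          PySem.List.pyGetD_eq_getElem _ _ h0j hj2]
        have hjl : j.toNat < rl.length := by omega
        simp [hjl]
      simp only [List.length_append, List.length_singleton]
      have hcast : (((rl.length + 1 : Nat)) : Int) = (rl.length : Int) + 1 := by push_cast; ring
      rw [hcast]
      by_cases hkm : k ≤ rl.length
      · rw [pyRange_succ_right_of_pos _ _ n hn (by exact_mod_cast hkm)]
        have hdvd_iff : n ∣ ((rl.length : Int) - (k : Int)) ↔ rl.length % n.toNat = k := by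
          rw [← Nat.cast_sub hkm]
          constructor
          · intro h
            have h' : (n.toNat : Int) ∣ ((rl.length - k : Nat) : Int) := by rwa [hN]
            have h2 : k % n.toNat = rl.length % n.toNat :=
              (Nat.modEq_iff_dvd' hkm).mpr (Int.natCast_dvd_natCast.mp h')
            rw [Nat.mod_eq_of_lt hkN] at h2
            omega
          · intro h
            have h2 : k % n.toNat = rl.length % n.toNat := by
              rw [Nat.mod_eq_of_lt hkN, h]
            have h' := Int.natCast_dvd_natCast.mpr ((Nat.modEq_iff_dvd' hkm).mp h2)
            rwa [hN] at h'
        by_cases hk : rl.length % n.toNat = k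
        · rw [if_pos (hdvd_iff.mpr hk), if_pos hk, List.map_append, hk]
          congr 1
          · exact (hmapeq _ (by positivity)).symm
          · simp only [List.map_cons, List.map_nil]
            congr 1
            rw [PySem.List.pyGetD_eq_getElem _ _ (by positivity) (by simp)]
            simp
        · rw [if_neg (fun h => hk (hdvd_iff.mp h)), if_neg hk, List.append_nil]
          exact (hmapeq _ (by positivity)).symm
      · have hmk : (rl.length : Int) < (k : Int) := by exact_mod_cast not_le.mp hkm
        have hne2 : rl.length % n.toNat ≠ k := by
          have := Nat.mod_le rl.length n.toNat
          omega
        rw [if_neg hne2, pyRange_pos_eq_nil _ _ n hn (by omega),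
          pyRange_pos_eq_nil _ _ n hn (by omega), List.map_nil, List.map_nil]

theorem pick_per_n_eq_map (result_list : List Int) (n : Int) :
    pick_per_n result_list n =
      (PySem.List.pyRange 0 n 1).map
        (fun i => (PySem.List.pyRange i (result_list.length : Int) n).map
          (fun j => PySem.List.pyGetD result_list j 0)) := by
  unfold pick_per_n
  rw [PySem.List.foldl_append_singleton_eq_map]
  simp only [List.nil_append]
  refine List.map_congr_left (fun i _ => ?_)
  rw [PySem.List.foldl_append_singleton_eq_map]
  simp

theorem main_pos (n : Int) (hn : 0 < n) (rl : List Int) :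
    pick_per_n rl n = pick_per_n_alt rl n := by
  rw [pick_per_n_eq_map]
  simp only [pick_per_n_alt]
  rw [if_neg (by rw [PySem.List.pyRange_one_cons (by omega : (0:Int) < n)]; simp)]
  exact (fold_eq n hn rl).symm

-- ===== VERDICT (by name: the statement is the Claim_ definition above) =====
theorem pick_per_n_spec : Claim_equal_pick_per_n := by
  intro rl n _
  unfold Spec_pick_per_n
  by_cases hn : 0 < n
  · exact main_pos n hn rl
  · have h : PySem.List.pyRange 0 n 1 = [] := PySem.List.pyRange_one_eq_nil (by omega)
    simp [pick_per_n, pick_per_n_alt, h]
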